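-- pv_equiv track=rewrite | github.com/m1el/codeguard-action | src/pii_shield.py | _map_label_to_zone
-- ===== SOURCE A (Python) =====
-- def _map_label_to_zone(label: str) -> str | None:
--     normalized = (label or "").strip().lower().replace("-", "_").replace(" ", "_")
--     if not normalized:
--         return None
--     parts = set(normalized.split("_"))
--     if any(k in parts for k in ("email", "phone", "ssn", "pii", "phi", "personal")):
--         return "pii"
--     if any(k in parts for k in ("card", "pan", "payment", "billing")):
--         return "payment"
--     if any(k in parts for k in ("secret", "token", "credential", "password", "key", "entropy")):
--         return "entropy_secret"
--     return None
-- ===== SOURCE B (Python) =====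
-- _RANK = {
--     "email": 0, "phone": 0, "ssn": 0, "pii": 0, "phi": 0, "personal": 0,
--     "card": 1, "pan": 1, "payment": 1, "billing": 1,
--     "secret": 2, "token": 2, "credential": 2, "password": 2, "key": 2, "entropy": 2,
-- }
-- _ZONES = ("pii", "payment", "entropy_secret")
--
--
-- def _map_label_to_zone(label):
--     normalized = (label or "").strip().lower().replace("-", "_").replace(" ", "_")
--     if not normalized:
--         return None
--     best = 3
--     for part in normalized.split("_"):
--         best = min(best, _RANK.get(part, 3))
--     return _ZONES[best] if best < 3 else None
-- ===== Notes on version B (the rewrite author's own statement) =====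
-- stated objective: alternative
-- what changed: Instead of building a token set and running three staged keyword-group membership scans, B folds once over the tokens computing the minimum priority rank via a keyword-to-rank table and indexes the zone tuple with that minimum, so priority resolution is arithmetic (min) rather than branch order.
import Mathlib
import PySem

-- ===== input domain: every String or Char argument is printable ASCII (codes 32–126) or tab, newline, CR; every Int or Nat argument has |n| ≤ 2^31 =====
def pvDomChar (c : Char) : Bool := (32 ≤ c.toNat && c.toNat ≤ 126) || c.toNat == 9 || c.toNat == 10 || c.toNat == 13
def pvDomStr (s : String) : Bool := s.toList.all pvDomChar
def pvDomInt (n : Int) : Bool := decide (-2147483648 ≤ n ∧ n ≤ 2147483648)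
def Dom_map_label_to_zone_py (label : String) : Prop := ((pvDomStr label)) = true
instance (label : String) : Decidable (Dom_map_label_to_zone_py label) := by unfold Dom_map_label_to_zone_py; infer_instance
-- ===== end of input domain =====

-- B replaces A's three staged keyword-group scans over a token set by one fold computing the
-- minimum priority rank of the tokens (keyword→rank table) plus a final tuple index (alternative).

-- ===== PORT A =====
def map_label_to_zone_py (label : String) : Option String :=
  let base := if label = "" then "" else label          -- (label or "")
  let normalized := PySem.Str.replace (PySem.Str.replace (PySem.Str.lower (PySem.Str.strip base)) "-" "_") " " "_"
  if normalized = "" then none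
  else
    let parts : PySem.Set String := PySem.Set.ofList ((PySem.Str.split? normalized "_").getD [])
    if ["email", "phone", "ssn", "pii", "phi", "personal"].any (fun k => PySem.Set.contains parts k) then some "pii"
    else if ["card", "pan", "payment", "billing"].any (fun k => PySem.Set.contains parts k) then some "payment"
    else if ["secret", "token", "credential", "password", "key", "entropy"].any (fun k => PySem.Set.contains parts k) then some "entropy_secret"
    else none

-- ===== PORT B =====
def pvRank : PySem.Dict String Int :=
  PySem.Dict.ofList
    [("email", 0), ("phone", 0), ("ssn", 0), ("pii", 0), ("phi", 0), ("personal", 0),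
     ("card", 1), ("pan", 1), ("payment", 1), ("billing", 1),
     ("secret", 2), ("token", 2), ("credential", 2), ("password", 2), ("key", 2), ("entropy", 2)]

-- Source B's loop: best = 3; for part in parts: best = min(best, _RANK.get(part, 3))
def pvBest (parts : List String) : Int :=
  parts.foldl (fun best part => min best (PySem.Dict.getD pvRank part 3)) 3

def map_label_to_zone_py_alt (label : String) : Option String :=
  let base := if label = "" then "" else label          -- (label or "")
  let normalized := PySem.Str.replace (PySem.Str.replace (PySem.Str.lower (PySem.Str.strip base)) "-" "_") " " "_"
  if normalized = "" then none
  else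
    let best := pvBest ((PySem.Str.split? normalized "_").getD [])
    -- _ZONES[best] if best < 3 else None  (best < 3 ⇒ index in range, so pyGet? is some)
    if best < 3 then PySem.List.pyGet? ["pii", "payment", "entropy_secret"] best else none

-- ===== PRECONDITION & SPEC =====
def Spec_map_label_to_zone_py (label : String) (out : Option String) : Prop := out = map_label_to_zone_py_alt label
instance (label : String) (out : Option String) : Decidable (Spec_map_label_to_zone_py label out) := by unfold Spec_map_label_to_zone_py; infer_instance

-- ===== CLAIM (what is proved, stated in full; the proofs are below) =====
def Claim_equal_map_label_to_zone_py : Prop := ∀ (label : String), Dom_map_label_to_zone_py label → Spec_map_label_to_zone_py label (map_label_to_zone_py label)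

-- ===== LEMMAS AND PROOFS =====

-- the rank table as an if-chain over the three keyword groups
set_option maxHeartbeats 1000000 in
theorem pv_rank_eq (p : String) :
    PySem.Dict.getD pvRank p 3 =
      if p ∈ (["email", "phone", "ssn", "pii", "phi", "personal"] : List String) then 0
      else if p ∈ (["card", "pan", "payment", "billing"] : List String) then 1
      else if p ∈ (["secret", "token", "credential", "password", "key", "entropy"] : List String) then 2
      else 3 := by
  by_cases e1 : p = "email";  · subst e1; decide
  by_cases e2 : p = "phone";  · subst e2; decide
  by_cases e3 : p = "ssn";    · subst e3; decide
  by_cases e4 : p = "pii";    · subst e4; decide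
  by_cases e5 : p = "phi";    · subst e5; decide
  by_cases e6 : p = "personal"; · subst e6; decide
  by_cases e7 : p = "card";   · subst e7; decide
  by_cases e8 : p = "pan";    · subst e8; decide
  by_cases e9 : p = "payment"; · subst e9; decide
  by_cases e10 : p = "billing"; · subst e10; decide
  by_cases e11 : p = "secret"; · subst e11; decide
  by_cases e12 : p = "token"; · subst e12; decide
  by_cases e13 : p = "credential"; · subst e13; decide
  by_cases e14 : p = "password"; · subst e14; decide
  by_cases e15 : p = "key";   · subst e15; decide
  by_cases e16 : p = "entropy"; · subst e16; decide
  have h : pvRank = PySem.Dict.mk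
    [("email", 0), ("phone", 0), ("ssn", 0), ("pii", 0), ("phi", 0), ("personal", 0),
     ("card", 1), ("pan", 1), ("payment", 1), ("billing", 1),
     ("secret", 2), ("token", 2), ("credential", 2), ("password", 2), ("key", 2), ("entropy", 2)] := by decide
  rw [h]
  simp [PySem.Dict.getD, PySem.Dict.get?, beq_iff_eq,
    e1, e2, e3, e4, e5, e6, e7, e8, e9, e10, e11, e12, e13, e14, e15, e16,
    Ne.symm e1, Ne.symm e2, Ne.symm e3, Ne.symm e4, Ne.symm e5, Ne.symm e6, Ne.symm e7, Ne.symm e8,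
    Ne.symm e9, Ne.symm e10, Ne.symm e11, Ne.symm e12, Ne.symm e13, Ne.symm e14, Ne.symm e15, Ne.symm e16]

-- the min-fold is bounded above by its starting value …
theorem pv_fold_le_init (ps : List String) (b : Int) :
    ps.foldl (fun best part => min best (PySem.Dict.getD pvRank part 3)) b ≤ b := by
  induction ps generalizing b with
  | nil => simp
  | cons p ps ih =>
    simp only [List.foldl_cons]
    exact le_trans (ih _) (min_le_left _ _)

-- … and by the rank of every member …
theorem pv_fold_le_mem (ps : List String) (p : String) :
    ∀ b : Int, p ∈ ps →
    ps.foldl (fun best part => min best (PySem.Dict.getD pvRank part 3)) b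
      ≤ PySem.Dict.getD pvRank p 3 := by
  induction ps with
  | nil => intro b hp; cases hp
  | cons q ps ih =>
    intro b hp
    simp only [List.foldl_cons]
    rcases List.mem_cons.mp hp with rfl | hp
    · exact le_trans (pv_fold_le_init _ _) (min_le_right _ _)
    · exact ih _ hp

-- … and bounded below by any common lower bound of the start and the ranks.
theorem pv_fold_lb (ps : List String) (k : Int) :
    ∀ b : Int, k ≤ b → (∀ p ∈ ps, k ≤ PySem.Dict.getD pvRank p 3) →
    k ≤ ps.foldl (fun best part => min best (PySem.Dict.getD pvRank part 3)) b := by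
  induction ps with
  | nil => intro b hb _; simpa using hb
  | cons p ps ih =>
    intro b hb h
    simp only [List.foldl_cons]
    exact ih _ (le_min hb (h p (by simp))) (fun q hq => h q (by simp [hq]))

-- core equivalence on the token list
theorem pv_core (ps : List String) :
    (if ["email", "phone", "ssn", "pii", "phi", "personal"].any (fun k => PySem.Set.contains (PySem.Set.ofList ps) k) then some "pii"
     else if ["card", "pan", "payment", "billing"].any (fun k => PySem.Set.contains (PySem.Set.ofList ps) k) then some "payment"
     else if ["secret", "token", "credential", "password", "key", "entropy"].any (fun k => PySem.Set.contains (PySem.Set.ofList ps) k) then some "entropy_secret"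
     else none)
    = (if pvBest ps < 3 then PySem.List.pyGet? ["pii", "payment", "entropy_secret"] (pvBest ps) else none) := by
  have ha : ∀ (ks : List String),
      (ks.any (fun k => PySem.Set.contains (PySem.Set.ofList ps) k) = true) ↔ ∃ p ∈ ps, p ∈ ks := by
    intro ks
    simp only [List.any_eq_true, PySem.Set.contains_iff, PySem.Set.mem_ofList]
    tauto
  by_cases c1 : ∃ p ∈ ps, p ∈ (["email", "phone", "ssn", "pii", "phi", "personal"] : List String)
  · obtain ⟨p, hp, hk⟩ := c1
    have hbest : pvBest ps = 0 := by
      have h1 := pv_fold_le_mem ps p 3 hp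
      rw [pv_rank_eq, if_pos hk] at h1
      have h2 := pv_fold_lb ps 0 3 (by norm_num) (fun q _ => by
        rw [pv_rank_eq]; split_ifs <;> norm_num)
      unfold pvBest; omega
    rw [if_pos ((ha _).mpr ⟨p, hp, hk⟩), hbest]
    decide
  · have r1 : ∀ q ∈ ps, (1:Int) ≤ PySem.Dict.getD pvRank q 3 := fun q hq => by
      rw [pv_rank_eq]
      have : q ∉ (["email", "phone", "ssn", "pii", "phi", "personal"] : List String) :=
        fun hm => c1 ⟨q, hq, hm⟩
      rw [if_neg this]; split_ifs <;> norm_num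
    rw [if_neg (fun h => c1 ((ha _).mp h))]
    by_cases c2 : ∃ p ∈ ps, p ∈ (["card", "pan", "payment", "billing"] : List String)
    · obtain ⟨p, hp, hk⟩ := c2
      have hbest : pvBest ps = 1 := by
        have h1 := pv_fold_le_mem ps p 3 hp
        rw [pv_rank_eq] at h1
        have hn1 : p ∉ (["email", "phone", "ssn", "pii", "phi", "personal"] : List String) :=
          fun hm => c1 ⟨p, hp, hm⟩
        rw [if_neg hn1, if_pos hk] at h1
        have h2 := pv_fold_lb ps 1 3 (by norm_num) r1
        unfold pvBest; omega
      rw [if_pos ((ha _).mpr ⟨p, hp, hk⟩), hbest]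
      decide
    · have r2 : ∀ q ∈ ps, (2:Int) ≤ PySem.Dict.getD pvRank q 3 := fun q hq => by
        rw [pv_rank_eq]
        have hn1 : q ∉ (["email", "phone", "ssn", "pii", "phi", "personal"] : List String) :=
          fun hm => c1 ⟨q, hq, hm⟩
        have hn2 : q ∉ (["card", "pan", "payment", "billing"] : List String) :=
          fun hm => c2 ⟨q, hq, hm⟩
        rw [if_neg hn1, if_neg hn2]; split_ifs <;> norm_num
      rw [if_neg (fun h => c2 ((ha _).mp h))]
      by_cases c3 : ∃ p ∈ ps, p ∈ (["secret", "token", "credential", "password", "key", "entropy"] : List String)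
      · obtain ⟨p, hp, hk⟩ := c3
        have hbest : pvBest ps = 2 := by
          have h1 := pv_fold_le_mem ps p 3 hp
          rw [pv_rank_eq] at h1
          have hn1 : p ∉ (["email", "phone", "ssn", "pii", "phi", "personal"] : List String) :=
            fun hm => c1 ⟨p, hp, hm⟩
          have hn2 : p ∉ (["card", "pan", "payment", "billing"] : List String) :=
            fun hm => c2 ⟨p, hp, hm⟩
          rw [if_neg hn1, if_neg hn2, if_pos hk] at h1
          have h2 := pv_fold_lb ps 2 3 (by norm_num) r2
          unfold pvBest; omega
        rw [if_pos ((ha _).mpr ⟨p, hp, hk⟩), hbest]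
        decide
      · have r3 : ∀ q ∈ ps, (3:Int) ≤ PySem.Dict.getD pvRank q 3 := fun q hq => by
          rw [pv_rank_eq]
          have hn1 : q ∉ (["email", "phone", "ssn", "pii", "phi", "personal"] : List String) :=
            fun hm => c1 ⟨q, hq, hm⟩
          have hn2 : q ∉ (["card", "pan", "payment", "billing"] : List String) :=
            fun hm => c2 ⟨q, hq, hm⟩
          have hn3 : q ∉ (["secret", "token", "credential", "password", "key", "entropy"] : List String) :=
            fun hm => c3 ⟨q, hq, hm⟩
          rw [if_neg hn1, if_neg hn2, if_neg hn3]
        have hbest : pvBest ps = 3 := by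
          have h1 := pv_fold_le_init ps 3
          have h2 := pv_fold_lb ps 3 3 le_rfl r3
          unfold pvBest; omega
        rw [if_neg (fun h => c3 ((ha _).mp h)), hbest]
        norm_num

-- ===== VERDICT (by name: the statement is the Claim_ definition above) =====
theorem map_label_to_zone_py_spec : Claim_equal_map_label_to_zone_py := by
  intro label _
  unfold Spec_map_label_to_zone_py map_label_to_zone_py map_label_to_zone_py_alt
  dsimp only
  by_cases h : PySem.Str.replace (PySem.Str.replace (PySem.Str.lower (PySem.Str.strip (if label = "" then "" else label))) "-" "_") " " "_" = ""
  · rw [if_pos h, if_pos h]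
  · rw [if_neg h, if_neg h]
    exact pv_core _
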